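-- pv_equiv track=rewrite | github.com/Jean-BaptisteLy/Negotiation | src/multilateral.py | set_Z
-- ===== SOURCE A (Python) =====
-- from copy import deepcopy
-- from itertools import combinations
--
-- def set_Z(agents_visible_objects):
--     """
--     {a:[(x,y)]} -> dict (agent1,agent2) : [(x,y)]
--     Renvoie un dictionnaire représentant les objects communs entre chaque groupe d'agents.
--     """
--     # objets en commun
--     Z = {}
--     # toutes les combinaisons possibles, formation des groupes d'agents
--     i = len(agents_visible_objects)
--     groupes = []
--     while(i > 1):
--         groupe = list(map(dict,combinations(agents_visible_objects.items(), i)))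
--         groupes += groupe
--         i -= 1
--     for groupe in groupes:
--         fusion_liste = []
--         partners = []
--         for groupe_key,groupe_value in groupe.items():
--             fusion_liste.append(groupe_value)
--             partners.append(groupe_key)
--         # éléments en communs dans un groupe d'agents
--         common_elements_before = set(fusion_liste[0])
--         for s in fusion_liste[1:]:
--             common_elements_before.intersection_update(s)
--         common_elements_after = deepcopy(common_elements_before)
--         for key,value in Z.items():
--             if set(tuple(partners)).issubset(key):
--                 for c in common_elements_before:
--                     if c in value:
--                         common_elements_after.remove(c)
--         if common_elements_after: # si éléments en commun, groupe confirmé (si liste non vide en fait...)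
--             Z[tuple(partners)] = common_elements_after
--     return Z
-- ===== SOURCE B (Python) =====
-- def set_Z(agents_visible_objects):
--     """
--     {a:[(x,y)]} -> dict (agent1,agent2,...) : {(x,y)}
--     For each object, its group is simply the tuple of agents that see it
--     (dict order); keep groups of at least two agents, presented largest
--     first and then in agent order, as the original does.
--     """
--     items = list(agents_visible_objects.items())
--     groups = {}
--     for a, objs in items:
--         for o in objs:
--             sig = tuple(k for k, v in items if o in v)
--             if len(sig) >= 2 and sig[0] == a:
--                 groups.setdefault(sig, set()).add(o)
--     pos = {k: i for i, (k, _) in enumerate(items)}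
--     order = sorted(groups, key=lambda s: (-len(s), [pos[k] for k in s]))
--     return {s: groups[s] for s in order}
-- ===== Notes on version B (the rewrite author's own statement) =====
-- stated objective: faster
-- what changed: Instead of enumerating all 2^n agent subsets and subtracting already-claimed objects, B computes for each object the tuple of agents that see it, groups objects by that signature in one pass, and sorts the resulting keys (largest group first, then agent order) to reproduce A's dict order.
import Mathlib
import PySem

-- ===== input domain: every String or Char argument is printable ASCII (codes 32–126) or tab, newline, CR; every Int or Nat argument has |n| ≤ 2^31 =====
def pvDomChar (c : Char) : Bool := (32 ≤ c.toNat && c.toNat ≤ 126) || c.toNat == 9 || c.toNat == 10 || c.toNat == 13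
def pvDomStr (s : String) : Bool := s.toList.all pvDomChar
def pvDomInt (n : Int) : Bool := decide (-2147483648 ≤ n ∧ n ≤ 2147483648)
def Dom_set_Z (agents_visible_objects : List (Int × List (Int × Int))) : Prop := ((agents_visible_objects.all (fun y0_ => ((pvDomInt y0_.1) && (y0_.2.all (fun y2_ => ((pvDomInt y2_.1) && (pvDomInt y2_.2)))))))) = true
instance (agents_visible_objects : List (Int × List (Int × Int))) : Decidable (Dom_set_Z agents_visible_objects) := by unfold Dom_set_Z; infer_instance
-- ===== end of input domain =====

-- B replaces A's enumeration of all 2^n agent subsets by one signature pass over the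
-- objects (each object's group is exactly the agents that see it) plus a sort of the
-- resulting keys; objective: faster (asymptotic).

-- ===== PORT A =====

-- itertools.combinations(items, r): subsets of size r in lexicographic index order
def pyCombinations {α : Type} : Nat → List α → List (List α)
  | 0, _ => [[]]
  | _+1, [] => []
  | r+1, x :: rest => (pyCombinations r rest).map (x :: ·) ++ pyCombinations (r+1) rest

-- the while(i > 1) loop collecting combinations of size i = n, n-1, …, 2
def set_Z_groupes (l : List (Int × List (Int × Int))) : Nat → List (List (Int × List (Int × Int)))
  | 0 => []
  | 1 => []
  | i+2 => pyCombinations (i+2) l ++ set_Z_groupes l (i+1)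

-- the body of 'for groupe in groupes' (the iteration over the set common_elements_before
-- is ported as a fold over its element list: which elements get discarded does not depend
-- on the iteration order; A's .remove is exact as discard here because the stored values
-- are pairwise disjoint, so no element is ever removed twice)
def set_Z_step (Z : PySem.Dict (List Int) (PySem.Set (Int × Int)))
    (groupe : List (Int × List (Int × Int))) : PySem.Dict (List Int) (PySem.Set (Int × Int)) :=
  let fusion_liste := groupe.map Prod.snd
  let partners := groupe.map Prod.fst
  -- groupe has length ≥ 2, so fusion_liste[0] never raises; headD's default is unreachable
  let common_before := (fusion_liste.drop 1).foldl (fun acc s => PySem.Set.inter acc s)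
      (PySem.Set.ofList (fusion_liste.headD []))
  let common_after := Z.items.foldl (fun acc kv =>
      if PySem.Set.issubset (PySem.Set.ofList partners) (PySem.Set.ofList kv.1) then
        common_before.foldl (fun a c => if kv.2.contains c then PySem.Set.discard a c else a) acc
      else acc) common_before
  if common_after = [] then Z else Z.insert partners common_after

def set_Z (agents_visible_objects : List (Int × List (Int × Int))) : List (List Int × List (Int × Int)) :=
  ((set_Z_groupes agents_visible_objects agents_visible_objects.length).foldl set_Z_step
    PySem.Dict.empty).items

-- ===== PORT B =====

-- tuple(k for k, v in items if o in v): the agents that see o, in dict order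
def sigOf (items : List (Int × List (Int × Int))) (o : Int × Int) : List Int :=
  (items.filter (fun kv => kv.2.contains o)).map Prod.fst

def set_Z_alt (agents_visible_objects : List (Int × List (Int × Int))) : List (List Int × List (Int × Int)) :=
  let items := agents_visible_objects
  let groups := items.foldl (fun g av =>
      av.2.foldl (fun g o =>
        let s := sigOf items o
        if 2 ≤ s.length ∧ s.headD 0 = av.1 then g.modify s PySem.Set.empty (fun st => st.add o)
        else g) g)
    PySem.Dict.empty
  let pos : PySem.Dict Int Int :=
    PySem.Dict.ofList ((PySem.List.enumerate items).map (fun p => (p.2.1, p.1)))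
  -- pos[k] never raises: every key of groups lists agents of items; getD's default is unreachable
  let order := PySem.List.sorted2 groups.keys (fun s => -(s.length : Int))
      (fun s => s.map (fun k => pos.getD k 0))
  (order.foldl (fun d s => d.insert s (groups.getD s [])) PySem.Dict.empty).items

-- ===== PRECONDITION & SPEC =====
-- Pre_ excludes association lists with a repeated agent key: A's argument is a Python
-- dict, whose keys are necessarily distinct, so such lists correspond to no Python input.
def Pre_set_Z (agents_visible_objects : List (Int × List (Int × Int))) : Prop :=
  (agents_visible_objects.map Prod.fst).Nodup
instance (agents_visible_objects : List (Int × List (Int × Int))) : Decidable (Pre_set_Z agents_visible_objects) := by unfold Pre_set_Z; infer_instance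

def pvWitness_set_Z : (List (Int × List (Int × Int))) :=
  [(1, [(0, 0), (1, 1), (2, 2)]), (2, [(1, 1), (2, 2)]), (3, [(2, 2), (5, 5)])]

def Spec_set_Z (agents_visible_objects : List (Int × List (Int × Int))) (out : List (List Int × List (Int × Int))) : Prop := out = set_Z_alt agents_visible_objects
instance (agents_visible_objects : List (Int × List (Int × Int))) (out : List (List Int × List (Int × Int))) : Decidable (Spec_set_Z agents_visible_objects out) := by unfold Spec_set_Z; infer_instance

-- ===== CLAIM (what is proved, stated in full; the proofs are below) =====
def Claim_equal_set_Z : Prop := ∀ (agents_visible_objects : List (Int × List (Int × Int))), Dom_set_Z agents_visible_objects → Pre_set_Z agents_visible_objects → Spec_set_Z agents_visible_objects (set_Z agents_visible_objects)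

-- ===== LEMMAS AND PROOFS =====

-- ---------- helper definitions (proof-only) ----------

-- the unique group (sub-association-list of l) whose members all see o
def grpOf (l : List (Int × List (Int × Int))) (o : Int × Int) : List (Int × List (Int × Int)) :=
  l.filter (fun kv => kv.2.contains o)

-- A's confirmed value for a group G: the first member's objects, deduplicated,
-- restricted to the objects seen by exactly G's agents
def valOf (l : List (Int × List (Int × Int))) (G : List (Int × List (Int × Int))) : List (Int × Int) :=
  (PySem.List.dedup ((G.headD (0, [])).2)).filter (fun o => sigOf l o == G.map Prod.fst)

-- ---------- §1 combinatorics ----------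

theorem combos_mem {α : Type} (r : Nat) (l : List α) (G : List α) :
    G ∈ pyCombinations r l ↔ G.Sublist l ∧ G.length = r := by
  induction l generalizing r G with
  | nil =>
    cases r with
    | zero => simp [pyCombinations, List.sublist_nil]
    | succ r =>
      simp only [pyCombinations, List.not_mem_nil, false_iff]
      rintro ⟨hs, hl⟩
      simp [List.sublist_nil] at hs
      subst hs; simp at hl
  | cons x rest ih =>
    cases r with
    | zero =>
      constructor
      · rintro h; simp [pyCombinations] at h; subst h; exact ⟨List.nil_sublist _, rfl⟩
      · rintro ⟨hs, hl⟩; rw [List.length_eq_zero_iff] at hl; subst hl; simp [pyCombinations]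
    | succ r =>
      simp only [pyCombinations, List.mem_append, List.mem_map]
      constructor
      · rintro (⟨H, hH, rfl⟩ | h)
        · obtain ⟨hs, hl⟩ := (ih r H).1 hH
          exact ⟨List.Sublist.cons₂ x hs, by simp [hl]⟩
        · obtain ⟨hs, hl⟩ := (ih (r+1) G).1 h
          exact ⟨hs.cons x, hl⟩
      · rintro ⟨hs, hl⟩
        rcases List.sublist_cons_iff.1 hs with h | ⟨Gt, rfl, hGt⟩
        · exact Or.inr ((ih (r+1) G).2 ⟨h, hl⟩)
        · exact Or.inl ⟨Gt, (ih r Gt).2 ⟨hGt, by simpa using hl⟩, rfl⟩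

theorem groupes_mem (l : List (Int × List (Int × Int))) (n : Nat)
    (G : List (Int × List (Int × Int))) :
    G ∈ set_Z_groupes l n ↔ G.Sublist l ∧ 2 ≤ G.length ∧ G.length ≤ n := by
  induction n with
  | zero =>
    simp only [set_Z_groupes, List.not_mem_nil, false_iff]
    rintro ⟨_, h2, hn⟩; omega
  | succ n ih =>
    match n with
    | 0 => simp [set_Z_groupes]; omega
    | Nat.succ m =>
      simp only [set_Z_groupes, List.mem_append, ih, combos_mem]
      constructor
      · rintro (⟨hs, hl⟩ | ⟨hs, h2, hn⟩)
        · exact ⟨hs, by omega, by omega⟩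
        · exact ⟨hs, h2, by omega⟩
      · rintro ⟨hs, h2, hn⟩
        by_cases h : G.length = m + 2
        · exact Or.inl ⟨hs, h⟩
        · exact Or.inr ⟨hs, h2, by omega⟩

-- two subsequences of a duplicate-free list with the same members are equal
theorem sub_same_mem {α : Type} {u s t : List α} (hu : u.Nodup)
    (hs : s.Sublist u) (ht : t.Sublist u) (h : ∀ x, x ∈ s ↔ x ∈ t) : s = t := by
  induction u generalizing s t with
  | nil => simp [List.sublist_nil] at hs ht; simp [hs, ht]
  | cons a u ih =>
    simp only [List.nodup_cons] at hu
    rcases List.sublist_cons_iff.1 hs with hs' | ⟨s', rfl, hs'⟩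
    · rcases List.sublist_cons_iff.1 ht with ht' | ⟨t', rfl, ht'⟩
      · exact ih hu.2 hs' ht' h
      · exact absurd ((hs'.mem ((h a).2 (List.mem_cons_self)))) hu.1 |> False.elim
    · rcases List.sublist_cons_iff.1 ht with ht' | ⟨t', rfl, ht'⟩
      · exact absurd ((ht'.mem ((h a).1 (List.mem_cons_self)))) hu.1 |> False.elim
      · have : ∀ x, x ∈ s' ↔ x ∈ t' := by
          intro x
          constructor
          · intro hx
            rcases List.mem_cons.1 ((h x).1 (List.mem_cons_of_mem a hx)) with rfl | hx'
            · exact absurd (hs'.mem hx) hu.1 |> False.elim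
            · exact hx'
          · intro hx
            rcases List.mem_cons.1 ((h x).2 (List.mem_cons_of_mem a hx)) with rfl | hx'
            · exact absurd (ht'.mem hx) hu.1 |> False.elim
            · exact hx'
        rw [ih hu.2 hs' ht' this]

-- with duplicate-free keys, a subsequence of l is determined by its key list
theorem sub_keys_eq {l G H : List (Int × List (Int × Int))}
    (hnd : (l.map Prod.fst).Nodup) (hG : G.Sublist l) (hH : H.Sublist l)
    (h : G.map Prod.fst = H.map Prod.fst) : G = H := by
  induction l generalizing G H with
  | nil => simp [List.sublist_nil] at hG hH; simp [hG, hH]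
  | cons kv l ih =>
    simp only [List.map_cons, List.nodup_cons] at hnd
    rcases List.sublist_cons_iff.1 hG with hG' | ⟨G', rfl, hG'⟩
    · rcases List.sublist_cons_iff.1 hH with hH' | ⟨H', rfl, hH'⟩
      · exact ih hnd.2 hG' hH' h
      · exfalso
        have : kv.1 ∈ G.map Prod.fst := by simp [h]
        exact hnd.1 ((hG'.map Prod.fst).mem this)
    · rcases List.sublist_cons_iff.1 hH with hH' | ⟨H', rfl, hH'⟩
      · exfalso
        have : kv.1 ∈ H.map Prod.fst := by simp [← h]
        exact hnd.1 ((hH'.map Prod.fst).mem this)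
      · simp only [List.map_cons, List.cons.injEq] at h
        rw [ih hnd.2 hG' hH' h.2]

theorem grp_sublist (l : List (Int × List (Int × Int))) (o : Int × Int) :
    (grpOf l o).Sublist l := List.filter_sublist

theorem mem_grp (l : List (Int × List (Int × Int))) (o : Int × Int)
    (kv : Int × List (Int × Int)) : kv ∈ grpOf l o ↔ kv ∈ l ∧ kv.2.contains o := by
  simp [grpOf]

theorem sig_eq_map_grp (l : List (Int × List (Int × Int))) (o : Int × Int) :
    sigOf l o = (grpOf l o).map Prod.fst := rfl

theorem mem_sig (l : List (Int × List (Int × Int))) (o : Int × Int) (k : Int) :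
    k ∈ sigOf l o ↔ ∃ kv ∈ l, kv.1 = k ∧ kv.2.contains o := by
  simp only [sig_eq_map_grp, List.mem_map, mem_grp]
  constructor
  · rintro ⟨kv, ⟨h1, h2⟩, rfl⟩; exact ⟨kv, h1, rfl, h2⟩
  · rintro ⟨kv, h1, rfl, h2⟩; exact ⟨kv, ⟨h1, h2⟩, rfl⟩

-- with duplicate-free keys, membership of an agent's key in a signature
-- decides whether that agent sees the object
theorem contains_iff_mem_sig {l : List (Int × List (Int × Int))}
    (hnd : (l.map Prod.fst).Nodup) {kv : Int × List (Int × Int)} (hkv : kv ∈ l)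
    (o : Int × Int) : kv.2.contains o = true ↔ kv.1 ∈ sigOf l o := by
  constructor
  · intro h; exact (mem_sig l o kv.1).2 ⟨kv, hkv, rfl, h⟩
  · intro h
    obtain ⟨kv', h1, h2, h3⟩ := (mem_sig l o kv.1).1 h
    have : kv' = kv := by
      have := List.inj_on_of_nodup_map hnd h1 hkv h2
      exact this
    exact this ▸ h3

-- ---------- §2 enumeration order ----------

-- B's sort key of a key list: size descending, then agent positions lexicographically
def posKey (l : List (Int × List (Int × Int))) (s : List Int) : Lex (Int × List Int) :=
  toLex (-(s.length : Int), s.map (fun k => ((List.idxOf k (l.map Prod.fst) : Nat) : Int)))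

theorem combos_pairwise_lex {α : Type} (p : α → Int) :
    ∀ (l : List α) (r : Nat), ((l.map p).Pairwise (· < ·)) →
    (pyCombinations r l).Pairwise (fun G H => G.map p < H.map p) := by
  intro l
  induction l with
  | nil =>
    intro r _
    cases r with
    | zero => simp [pyCombinations]
    | succ r => simp [pyCombinations]
  | cons x rest ih =>
    intro r hp
    simp only [List.map_cons, List.pairwise_cons] at hp
    cases r with
    | zero => simp [pyCombinations]
    | succ r =>
      simp only [pyCombinations]
      rw [List.pairwise_append]
      refine ⟨?_, ih (r+1) hp.2, ?_⟩
      · rw [List.pairwise_map]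
        exact (ih r hp.2).imp (fun h => by
          simp only [List.map_cons, List.cons_lt_cons_iff]
          exact Or.inr ⟨trivial, h⟩)
      · rintro a ha b hb
        obtain ⟨G, hG, rfl⟩ := List.mem_map.1 ha
        obtain ⟨hbs, hbl⟩ := (combos_mem (r+1) rest b).1 hb
        match b, hbl with
        | h0 :: H', _ =>
          have hh0 : h0 ∈ rest := hbs.mem List.mem_cons_self
          have : p x < p h0 := hp.1 (p h0) (List.mem_map.2 ⟨h0, hh0, rfl⟩)
          simp only [List.map_cons, List.cons_lt_cons_iff]
          exact Or.inl this

theorem keys_idx_pairwise (ks : List Int) (h : ks.Nodup) :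
    (ks.map (fun k => ((List.idxOf k ks : Nat) : Int))).Pairwise (· < ·) := by
  rw [List.pairwise_iff_getElem]
  intro i j hi hj hij
  simp only [List.getElem_map]
  rw [h.idxOf_getElem i (by simpa using hi), h.idxOf_getElem j (by simpa using hj)]
  exact_mod_cast hij

theorem groupes_pairwise (l : List (Int × List (Int × Int)))
    (hnd : (l.map Prod.fst).Nodup) (n : Nat) :
    (set_Z_groupes l n).Pairwise
      (fun G H => posKey l (G.map Prod.fst) < posKey l (H.map Prod.fst)) := by
  induction n with
  | zero => simp [set_Z_groupes]
  | succ n ih =>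
    match n with
    | 0 => simp [set_Z_groupes]
    | Nat.succ m =>
      simp only [set_Z_groupes]
      rw [List.pairwise_append]
      refine ⟨?_, ih, ?_⟩
      · have hp : (l.map (fun kv => ((List.idxOf kv.1 (l.map Prod.fst) : Nat) : Int))).Pairwise (· < ·) := by
          have := keys_idx_pairwise (l.map Prod.fst) hnd
          rwa [List.map_map] at this
        refine List.Pairwise.imp_of_mem ?_ (combos_pairwise_lex _ l (m+2) hp)
        intro G H hGm hHm h
        obtain ⟨_, hGl⟩ := (combos_mem (m+2) l G).1 hGm
        obtain ⟨_, hHl⟩ := (combos_mem (m+2) l H).1 hHm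
        simp only [posKey, Prod.Lex.toLex_lt_toLex]
        right
        refine ⟨by simp [List.length_map, hGl, hHl], ?_⟩
        simpa [List.map_map] using h
      · intro G hG H hH
        obtain ⟨_, hGl⟩ := (combos_mem (m+2) l G).1 hG
        obtain ⟨_, _, hHl⟩ := (groupes_mem l (m+1+1-1) H).1 (by simpa using hH)
        simp only [posKey, Prod.Lex.toLex_lt_toLex]
        left
        simp only [List.length_map]
        omega

-- ---------- §3 A's fold over the groups ----------

def expectItems (l : List (Int × List (Int × Int)))
    (P : List (List (Int × List (Int × Int)))) : List (List Int × List (Int × Int)) :=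
  (P.filter (fun G => !(valOf l G).isEmpty)).map (fun G => (G.map Prod.fst, valOf l G))

theorem inter_foldl {α : Type} [BEq α] (xs : List (List α)) :
    ∀ (a : List α), xs.foldl (fun acc s => PySem.Set.inter acc s) a
      = a.filter (fun x => xs.all (fun s => s.contains x)) := by
  induction xs with
  | nil => intro a; simp
  | cons s xs ih =>
    intro a
    rw [List.foldl_cons, ih (PySem.Set.inter a s), PySem.Set.inter, List.filter_filter]
    apply List.filter_congr
    intro x _
    simp only [List.all_cons, PySem.Set.contains]
    rw [Bool.and_comm]

theorem discard_foldl {α : Type} [BEq α] [LawfulBEq α] (V : PySem.Set α) :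
    ∀ (cb acc : List α),
    cb.foldl (fun a c => if V.contains c then PySem.Set.discard a c else a) acc
      = acc.filter (fun x => !(cb.contains x && V.contains x)) := by
  intro cb
  induction cb with
  | nil => simp
  | cons c cb ih =>
    intro acc
    rw [List.foldl_cons]
    cases hVc : V.contains c with
    | true =>
      rw [if_pos rfl, ih, PySem.Set.discard, List.filter_filter]
      apply List.filter_congr
      intro x _
      by_cases hxc : x = c
      · subst hxc
        have hv : x ∈ V := by simpa [PySem.Set.contains] using hVc
        simp [List.contains_cons, hv, PySem.Set.contains]
      · simp [List.contains_cons, hxc, PySem.Set.contains]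
    | false =>
      rw [if_neg (by simp), ih]
      apply List.filter_congr
      intro x _
      by_cases hxc : x = c
      · subst hxc
        have hv : x ∉ V := by simpa [PySem.Set.contains] using hVc
        simp [List.contains_cons, hv, PySem.Set.contains]
      · simp [List.contains_cons, hxc, PySem.Set.contains]

theorem removal_foldl (cb : List (Int × Int)) (partners : List Int) :
    ∀ (items : List (List Int × PySem.Set (Int × Int))) (acc : List (Int × Int)),
    items.foldl (fun acc kv =>
        if PySem.Set.issubset (PySem.Set.ofList partners) (PySem.Set.ofList kv.1) then
          cb.foldl (fun a c => if kv.2.contains c then PySem.Set.discard a c else a) acc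
        else acc) acc
      = acc.filter (fun x => items.all (fun kv =>
          !(PySem.Set.issubset (PySem.Set.ofList partners) (PySem.Set.ofList kv.1))
            || !(cb.contains x && PySem.Set.contains kv.2 x))) := by
  intro items
  induction items with
  | nil => simp
  | cons kv items ih =>
    intro acc
    rw [List.foldl_cons]
    by_cases hq : PySem.Set.issubset (PySem.Set.ofList partners) (PySem.Set.ofList kv.1) = true
    · rw [if_pos hq]
      rw [discard_foldl, ih, List.filter_filter]
      apply List.filter_congr
      intro x _
      simp only [List.all_cons, hq]
      rw [Bool.and_comm]
      simp
    · rw [if_neg hq, ih]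
      apply List.filter_congr
      intro x _
      simp only [List.all_cons, Bool.not_eq_true] at hq ⊢
      simp [hq]

-- the one-group step of A's main loop, on a state that already holds the groups of P
theorem step_eq (l : List (Int × List (Int × Int))) (hnd : (l.map Prod.fst).Nodup)
    (P : List (List (Int × List (Int × Int)))) (G : List (Int × List (Int × Int)))
    (hGsub : G.Sublist l) (hGlen : 2 ≤ G.length)
    (hP : ∀ G' ∈ P, G'.Sublist l)
    (hGP : G ∉ P)
    (hsup : ∀ o : Int × Int, 2 ≤ (grpOf l o).length → G.length < (grpOf l o).length →
      grpOf l o ∈ P) :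
    set_Z_step ⟨expectItems l P⟩ G = ⟨expectItems l (P ++ [G])⟩ := by
  match G, hGlen with
  | g₀ :: Gt, _ =>
  have hg₀ : g₀ ∈ l := hGsub.mem List.mem_cons_self
  simp only [set_Z_step]
  -- common_before
  rw [show ((g₀ :: Gt).map Prod.snd).headD [] = g₀.2 from rfl,
      show ((g₀ :: Gt).map Prod.snd).drop 1 = Gt.map Prod.snd from rfl,
      inter_foldl]
  set partners := (g₀ :: Gt).map Prod.fst with hpart
  set cb := (PySem.Set.ofList g₀.2).filter
      (fun x => (Gt.map Prod.snd).all (fun s => s.contains x)) with hcb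
  -- the removal loop
  simp only [removal_foldl]
  -- membership facts about cb
  have hcb_mem : ∀ x : Int × Int, x ∈ cb ↔ x ∈ g₀.2 ∧ ∀ kv ∈ Gt, kv.2.contains x := by
    intro x
    rw [hcb]
    simp only [List.mem_filter, PySem.Set.mem_ofList, List.all_eq_true]
    constructor
    · rintro ⟨h1, h2⟩
      exact ⟨h1, fun kv hkv => h2 kv.2 (List.mem_map.2 ⟨kv, hkv, rfl⟩)⟩
    · rintro ⟨h1, h2⟩
      refine ⟨h1, fun s hs => ?_⟩
      obtain ⟨kv, hkv, rfl⟩ := List.mem_map.1 hs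
      exact h2 kv hkv
  -- the key computation: the filtered cb is exactly valOf l (g₀ :: Gt)
  have hmain : cb.filter (fun x => (expectItems l P).all (fun kv =>
        !(PySem.Set.issubset (PySem.Set.ofList partners) (PySem.Set.ofList kv.1))
          || !(cb.contains x && PySem.Set.contains kv.2 x)))
      = valOf l (g₀ :: Gt) := by
    rw [hcb, List.filter_filter, valOf, PySem.List.dedup_eq_ofList]
    apply List.filter_congr
    intro x hx
    have hxg : x ∈ g₀.2 := (PySem.Set.mem_ofList _ _).1 hx
    show ((expectItems l P).all _ && _) = (sigOf l x == partners)
    by_cases hsig : sigOf l x = partners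
    · -- kept: the object belongs to exactly this group
      have hinG : (Gt.map Prod.snd).all (fun s => s.contains x) = true := by
        simp only [List.all_eq_true]
        intro s hs
        obtain ⟨kv, hkv, rfl⟩ := List.mem_map.1 hs
        refine (contains_iff_mem_sig hnd (hGsub.mem (List.mem_cons_of_mem g₀ hkv)) x).2 ?_
        rw [hsig, hpart]
        exact List.mem_map.2 ⟨kv, List.mem_cons_of_mem g₀ hkv, rfl⟩
      have hall : (expectItems l P).all (fun kv =>
          !(PySem.Set.issubset (PySem.Set.ofList partners) (PySem.Set.ofList kv.1))
            || !(cb.contains x && PySem.Set.contains kv.2 x)) = true := by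
        simp only [List.all_eq_true, expectItems, List.mem_map, List.mem_filter]
        rintro kv ⟨G', ⟨hG'P, -⟩, rfl⟩
        have hxval : x ∉ valOf l G' := by
          intro hxv
          have : sigOf l x = G'.map Prod.fst := by
            have := (List.mem_filter.1 hxv).2
            simpa using this
          have hGG' : (g₀ :: Gt) = G' :=
            sub_keys_eq hnd hGsub (hP G' hG'P) (by rw [← hpart, ← this, hsig])
          exact hGP (hGG' ▸ hG'P)
        simp only [Bool.or_eq_true, Bool.not_eq_eq_eq_not, Bool.not_true,
          Bool.and_eq_true, not_and]
        right
        simp only [Bool.not_eq_true', Bool.and_eq_false_iff]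
        right
        simpa [PySem.Set.contains] using hxval
      rw [hall, hinG]
      simp [hsig]
    · -- dropped or never common
      cases hinG : (Gt.map Prod.snd).all (fun s => s.contains x) with
      | false => simp [hsig]
      | true =>
        -- x is common to all of G but seen by strictly more agents
        have hsub : ∀ k ∈ partners, k ∈ sigOf l x := by
          intro k hk
          rw [hpart] at hk
          obtain ⟨kv, hkv, rfl⟩ := List.mem_map.1 hk
          refine (contains_iff_mem_sig hnd (hGsub.mem hkv) x).1 ?_
          rcases List.mem_cons.1 hkv with rfl | hkv'
          · simpa using hxg
          · simp only [List.all_eq_true] at hinG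
            exact hinG kv.2 (List.mem_map.2 ⟨kv, hkv', rfl⟩)
        have hplen : partners.length < (sigOf l x).length := by
          have hpnd : partners.Nodup := (hGsub.map Prod.fst).nodup hnd
          have hssub : (sigOf l x).Sublist (l.map Prod.fst) :=
            (grp_sublist l x).map Prod.fst
          have hpsubl : partners.Sublist (l.map Prod.fst) := hGsub.map Prod.fst
          have hle : partners.length ≤ (sigOf l x).length :=
            (List.subperm_of_subset hpnd (fun k hk => hsub k hk)).length_le
          rcases lt_or_eq_of_le hle with h | h
          · exact h
          · exfalso
            have hperm : partners.Perm (sigOf l x) :=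
              (List.subperm_of_subset hpnd (fun k hk => hsub k hk)).perm_of_length_le
                (le_of_eq h.symm)
            have : partners = sigOf l x :=
              sub_same_mem hnd hpsubl hssub (fun k => hperm.mem_iff)
            exact hsig this.symm
        have hglen2 : 2 ≤ (grpOf l x).length := by
          have : partners.length = (g₀ :: Gt).length := by simp [hpart]
          have hsl : (sigOf l x).length = (grpOf l x).length := by
            rw [sig_eq_map_grp]; simp
          omega
        have hgin : grpOf l x ∈ P := by
          apply hsup x hglen2
          have : partners.length = (g₀ :: Gt).length := by simp [hpart]
          have hsl : (sigOf l x).length = (grpOf l x).length := by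
            rw [sig_eq_map_grp]; simp
          omega
        -- the group of x is stored and its value contains x: x gets discarded
        have hxval : x ∈ valOf l (grpOf l x) := by
          have hgne : grpOf l x ≠ [] := by
            intro h; rw [h] at hglen2; simp at hglen2
          match hg : grpOf l x, hgne with
          | kv₀ :: gt, _ =>
            have hkv₀ : kv₀ ∈ grpOf l x := by rw [hg]; exact List.mem_cons_self
            have hcont : kv₀.2.contains x := ((mem_grp l x kv₀).1 hkv₀).2
            simp only [valOf, List.mem_filter, List.headD_cons]
            refine ⟨(PySem.List.mem_dedup _ _).2 (by simpa using hcont), ?_⟩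
            simp only [beq_iff_eq]
            rw [← hg, ← sig_eq_map_grp]
          | [], h => exact absurd rfl h
        have hvne : ¬(valOf l (grpOf l x)).isEmpty := by
          simp only [List.isEmpty_iff]
          intro h; rw [h] at hxval; exact List.not_mem_nil hxval
        have hitem : ((grpOf l x).map Prod.fst, valOf l (grpOf l x)) ∈ expectItems l P := by
          simp only [expectItems, List.mem_map, List.mem_filter]
          exact ⟨grpOf l x, ⟨hgin, by simpa using hvne⟩, rfl⟩
        have hxcb : x ∈ cb := (hcb_mem x).2 ⟨hxg, by
          intro kv hkv
          simp only [List.all_eq_true] at hinG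
          exact hinG kv.2 (List.mem_map.2 ⟨kv, hkv, rfl⟩)⟩
        have hall : (expectItems l P).all (fun kv =>
            !(PySem.Set.issubset (PySem.Set.ofList partners) (PySem.Set.ofList kv.1))
              || !(cb.contains x && PySem.Set.contains kv.2 x)) = false := by
          rw [List.all_eq_false]
          refine ⟨_, hitem, ?_⟩
          have h1 : PySem.Set.issubset (PySem.Set.ofList partners)
              (PySem.Set.ofList ((grpOf l x).map Prod.fst)) = true := by
            simp only [PySem.Set.issubset, List.all_eq_true]
            intro k hk
            have : k ∈ partners := (PySem.Set.mem_ofList _ _).1 hk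
            have := hsub k this
            rw [sig_eq_map_grp] at this
            simpa [PySem.Set.mem_ofList] using (PySem.Set.mem_ofList _ k).2 this
          have h2 : cb.contains x := by simpa using hxcb
          have h3 : PySem.Set.contains (valOf l (grpOf l x)) x := by
            simpa [PySem.Set.contains] using hxval
          simp [h1, h2, h3]
          exact ⟨hxcb, hxval⟩
        rw [hall]
        simp [hsig]
  rw [hmain]
  -- the final branch: skip or append
  by_cases hv : valOf l (g₀ :: Gt) = []
  · rw [if_pos hv]
    congr 1
    simp only [expectItems, List.filter_append, List.map_append]
    have : List.filter (fun G => !(valOf l G).isEmpty) [g₀ :: Gt] = [] := by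
      simp [hv]
    rw [this]
    simp
  · rw [if_neg hv]
    have hnc : (PySem.Dict.mk (expectItems l P)).contains partners = false := by
      simp only [PySem.Dict.contains, PySem.Dict.items, List.any_eq_false]
      rintro kv hkv
      simp only [expectItems, List.mem_map, List.mem_filter] at hkv
      obtain ⟨G', ⟨hG'P, -⟩, rfl⟩ := hkv
      simp only [beq_iff_eq]
      intro hkeq
      have : G' = g₀ :: Gt := sub_keys_eq hnd (hP G' hG'P) hGsub (by rw [hkeq, hpart])
      exact hGP (this ▸ hG'P)
    simp only [PySem.Dict.insert, hnc, Bool.false_eq_true, if_false]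
    congr 1
    simp only [PySem.Dict.items, expectItems, List.filter_append, List.map_append]
    congr 1
    rw [hpart]
    simp [hv]

theorem posKey_lt_length_le {l : List (Int × List (Int × Int))}
    {G H : List (Int × List (Int × Int))}
    (h : posKey l (G.map Prod.fst) < posKey l (H.map Prod.fst)) : H.length ≤ G.length := by
  rcases Prod.Lex.toLex_lt_toLex.1 h with h1 | ⟨h1, -⟩ <;>
    simp only [List.length_map] at h1 <;> omega

theorem groupes_nodup (l : List (Int × List (Int × Int)))
    (hnd : (l.map Prod.fst).Nodup) (n : Nat) : (set_Z_groupes l n).Nodup := by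
  refine (groupes_pairwise l hnd n).imp ?_
  intro G H h hGH
  rw [hGH] at h
  exact lt_irrefl _ h

theorem foldA (l : List (Int × List (Int × Int))) (hnd : (l.map Prod.fst).Nodup) :
    ∀ (R P : List (List (Int × List (Int × Int)))),
    P ++ R = set_Z_groupes l l.length →
    R.foldl set_Z_step ⟨expectItems l P⟩ = ⟨expectItems l (P ++ R)⟩ := by
  intro R
  induction R with
  | nil => intro P h; simp
  | cons G R' ih =>
    intro P hfull
    have hGmem : G ∈ set_Z_groupes l l.length := by
      rw [← hfull]; exact List.mem_append.2 (Or.inr List.mem_cons_self)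
    obtain ⟨hGsub, hGlen, -⟩ := (groupes_mem l l.length G).1 hGmem
    have hnodup : (P ++ G :: R').Nodup := by
      rw [hfull]; exact groupes_nodup l hnd l.length
    have hGP : G ∉ P := by
      intro h
      rcases List.nodup_append.1 hnodup with ⟨-, -, hdisj⟩
      exact hdisj G h G List.mem_cons_self rfl
    have hpw : (P ++ G :: R').Pairwise
        (fun G' H => posKey l (G'.map Prod.fst) < posKey l (H.map Prod.fst)) := by
      rw [hfull]; exact groupes_pairwise l hnd l.length
    have hsup : ∀ o : Int × Int, 2 ≤ (grpOf l o).length → G.length < (grpOf l o).length →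
        grpOf l o ∈ P := by
      intro o h2 hlen
      have hmem : grpOf l o ∈ set_Z_groupes l l.length :=
        (groupes_mem l l.length (grpOf l o)).2
          ⟨grp_sublist l o, h2, (grp_sublist l o).length_le⟩
      rw [← hfull] at hmem
      rcases List.mem_append.1 hmem with h | h
      · exact h
      · exfalso
        rcases List.mem_cons.1 h with rfl | h'
        · omega
        · have := (List.pairwise_append.1 hpw).2.1
          have hlt := (List.pairwise_cons.1 this).1 (grpOf l o) h'
          have := posKey_lt_length_le hlt
          omega
    have hP : ∀ G' ∈ P, G'.Sublist l := by
      intro G' hG'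
      have : G' ∈ set_Z_groupes l l.length := by
        rw [← hfull]; exact List.mem_append.2 (Or.inl hG')
      exact ((groupes_mem l l.length G').1 this).1
    rw [List.foldl_cons, step_eq l hnd P G hGsub hGlen hP hGP hsup]
    have hfull' : (P ++ [G]) ++ R' = set_Z_groupes l l.length := by
      rw [List.append_assoc]; simpa using hfull
    rw [ih (P ++ [G]) hfull']
    simp

theorem setZ_eq_expect (l : List (Int × List (Int × Int)))
    (hnd : (l.map Prod.fst).Nodup) :
    set_Z l = expectItems l (set_Z_groupes l l.length) := by
  unfold set_Z
  have h := foldA l hnd (set_Z_groupes l l.length) [] (by simp)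
  have he : (PySem.Dict.empty : PySem.Dict (List Int) (PySem.Set (Int × Int)))
      = ⟨expectItems l []⟩ := by
    simp [PySem.Dict.empty, expectItems]
  rw [he, h]
  simp

-- ---------- §4 dictionary and set toolbox ----------

theorem ofList_append_one {α : Type} [BEq α] (as : List α) (a : α) :
    PySem.Set.ofList (as ++ [a]) = PySem.Set.add (PySem.Set.ofList as) a := by
  rw [PySem.Set.ofList_eq_foldl, PySem.Set.ofList_eq_foldl, List.foldl_append]
  rfl

theorem dedup_append_one_mem {α : Type} [BEq α] [LawfulBEq α] (as : List α) (a : α)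
    (h : a ∈ as) : PySem.List.dedup (as ++ [a]) = PySem.List.dedup as := by
  rw [PySem.List.dedup_eq_ofList, PySem.List.dedup_eq_ofList, ofList_append_one,
    PySem.Set.add]
  rw [if_pos]
  simp [PySem.Set.contains, PySem.Set.mem_ofList, h]

theorem dedup_append_one_notmem {α : Type} [BEq α] [LawfulBEq α] (as : List α) (a : α)
    (h : a ∉ as) : PySem.List.dedup (as ++ [a]) = PySem.List.dedup as ++ [a] := by
  rw [PySem.List.dedup_eq_ofList, PySem.List.dedup_eq_ofList, ofList_append_one,
    PySem.Set.add]
  rw [if_neg]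
  simp [PySem.Set.contains, PySem.Set.mem_ofList, h]

theorem dedup_filter {α : Type} [BEq α] [LawfulBEq α] (p : α → Bool) (xs : List α) :
    PySem.List.dedup (xs.filter p) = (PySem.List.dedup xs).filter p := by
  induction xs using List.reverseRecOn with
  | nil => simp
  | append_singleton xs a ih =>
    rw [List.filter_append]
    by_cases hp : p a = true
    · have hfa : List.filter p [a] = [a] := by simp [hp]
      rw [hfa]
      by_cases hm : a ∈ xs
      · rw [dedup_append_one_mem xs a hm,
          dedup_append_one_mem _ _ (List.mem_filter.2 ⟨hm, hp⟩), ih]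
      · rw [dedup_append_one_notmem xs a hm,
          dedup_append_one_notmem _ _ (fun hc => hm (List.mem_filter.1 hc).1), ih,
          List.filter_append, hfa]
    · have hfa : List.filter p [a] = [] := by simp [hp]
      rw [hfa, List.append_nil]
      by_cases hm : a ∈ xs
      · rw [dedup_append_one_mem xs a hm, ih]
      · rw [dedup_append_one_notmem xs a hm, ih, List.filter_append, hfa,
          List.append_nil]

theorem get?_mapkeys {κ ν : Type} [BEq κ] [LawfulBEq κ] (f : κ → ν) :
    ∀ (ks : List κ), ks.Nodup → ∀ (k0 : κ),
    (PySem.Dict.mk (ks.map (fun k => (k, f k)))).get? k0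
      = if k0 ∈ ks then some (f k0) else none := by
  intro ks
  induction ks with
  | nil => intro _ k0; simp [PySem.Dict.get?]
  | cons k ks ih =>
    intro hnd k0
    rw [List.map_cons, PySem.Dict.get?_mk_cons]
    by_cases hk : k = k0
    · subst hk
      simp
    · rw [if_neg (by simpa using hk), ih (List.nodup_cons.1 hnd).2 k0]
      by_cases h0 : k0 ∈ ks
      · rw [if_pos h0, if_pos (List.mem_cons_of_mem k h0)]
      · rw [if_neg h0, if_neg (by simp [h0, Ne.symm hk])]

theorem contains_mapkeys {κ ν : Type} [BEq κ] [LawfulBEq κ] (f : κ → ν)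
    (ks : List κ) (hnd : ks.Nodup) (k0 : κ) :
    (PySem.Dict.mk (ks.map (fun k => (k, f k)))).contains k0 = (k0 ∈ ks : Bool) := by
  by_cases h : k0 ∈ ks
  · have hc : (PySem.Dict.mk (ks.map (fun k => (k, f k)))).contains k0 = true := by
      simp only [PySem.Dict.contains, PySem.Dict.items]
      exact List.any_eq_true.2 ⟨(k0, f k0), List.mem_map.2 ⟨k0, h, rfl⟩, by simp⟩
    rw [hc, decide_eq_true h]
  · have hc : (PySem.Dict.mk (ks.map (fun k => (k, f k)))).contains k0 = false := by
      simp only [PySem.Dict.contains, PySem.Dict.items]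
      rw [List.any_eq_false]
      rintro p hp
      obtain ⟨k, hk, rfl⟩ := List.mem_map.1 hp
      simp only [beq_iff_eq]
      exact fun he => h (he ▸ hk)
    rw [hc, decide_eq_false h]

theorem insert_fold_nodup {κ ν : Type} [BEq κ] [LawfulBEq κ] (v : κ → ν) :
    ∀ (ks : List κ), ks.Nodup →
    (ks.foldl (fun d s => d.insert s (v s)) PySem.Dict.empty).items
      = ks.map (fun s => (s, v s)) := by
  intro ks
  induction ks using List.reverseRecOn with
  | nil => intro _; rfl
  | append_singleton ks a ih =>
    intro hnd
    have hnd' : ks.Nodup := (List.nodup_append.1 hnd).1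
    have ha : a ∉ ks := by
      intro hc
      rcases List.nodup_append.1 hnd with ⟨-, -, hdisj⟩
      exact hdisj a hc a List.mem_cons_self rfl
    rw [List.foldl_append, List.foldl_cons, List.foldl_nil]
    have hitems : (ks.foldl (fun d s => d.insert s (v s)) PySem.Dict.empty)
        = PySem.Dict.mk (ks.map (fun s => (s, v s))) := by
      have := ih hnd'
      cases hd : ks.foldl (fun d s => d.insert s (v s)) PySem.Dict.empty with
      | mk items => rw [hd] at this; simp only [PySem.Dict.items] at this; rw [this]
    rw [hitems, PySem.Dict.insert, contains_mapkeys v ks hnd' a, decide_eq_false ha]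
    simp [PySem.Dict.items]

theorem ofList_items_nodup {κ ν : Type} [BEq κ] [LawfulBEq κ] :
    ∀ (ps : List (κ × ν)), (ps.map Prod.fst).Nodup →
    (PySem.Dict.ofList ps).items = ps := by
  intro ps
  induction ps using List.reverseRecOn with
  | nil => intro _; rfl
  | append_singleton ps q ih =>
    intro hnd
    rw [List.map_append] at hnd
    have hnd' : (ps.map Prod.fst).Nodup := (List.nodup_append.1 hnd).1
    have hq : q.1 ∉ ps.map Prod.fst := by
      intro hc
      rcases List.nodup_append.1 hnd with ⟨-, -, hdisj⟩
      exact hdisj q.1 hc q.1 (by simp) rfl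
    simp only [PySem.Dict.ofList, PySem.Dict.update] at ih ⊢
    rw [List.foldl_append, List.foldl_cons, List.foldl_nil]
    have hitems : (ps.foldl (fun acc p => acc.insert p.1 p.2) PySem.Dict.empty)
        = PySem.Dict.mk ps := by
      have := ih hnd'
      cases hd : ps.foldl (fun acc p => acc.insert p.1 p.2) PySem.Dict.empty with
      | mk items => rw [hd] at this; simp only [PySem.Dict.items] at this; rw [this]
    rw [hitems, PySem.Dict.insert]
    have hnc : (PySem.Dict.mk ps).contains q.1 = false := by
      simp only [PySem.Dict.contains, PySem.Dict.items]
      rw [List.any_eq_false]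
      intro p hp
      simp only [beq_iff_eq]
      intro he
      exact hq (List.mem_map.2 ⟨p, hp, he⟩)
    rw [hnc]
    simp [PySem.Dict.items]

theorem enum_find (k : Int) :
    ∀ (l : List (Int × List (Int × Int))) (st : Int), k ∈ l.map Prod.fst →
    List.find? (fun p => p.1 == k) ((PySem.List.enumerate l st).map (fun p => (p.2.1, p.1)))
      = some (k, st + (List.idxOf k (l.map Prod.fst) : Int)) := by
  intro l
  induction l with
  | nil => intro st h; simp at h
  | cons av l ih =>
    intro st h
    rw [show PySem.List.enumerate (av :: l) st = (st, av) :: PySem.List.enumerate l (st + 1)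
      from rfl]
    rw [List.map_cons, List.find?_cons]
    cases hbeq : (((st, av).2.1, (st, av).1).1 == k) with
    | true =>
      have hk : av.1 = k := by simpa using hbeq
      subst hk
      simp
    | false =>
      have hk : ¬av.1 = k := by simpa using hbeq
      have hmem : k ∈ l.map Prod.fst := by
        rcases List.mem_cons.1 h with h' | h'
        · exact absurd h'.symm hk
        · exact h'
      simp only []
      rw [ih (st + 1) hmem]
      have hidx : List.idxOf k (av.1 :: l.map Prod.fst) = List.idxOf k (l.map Prod.fst) + 1 := by
        rw [List.idxOf_cons_ne _ (by simpa using hk)]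
      simp only [List.map_cons, hidx]
      congr 2
      push_cast
      omega

-- ---------- §5 B's grouping pass ----------

def stepB (items : List (Int × List (Int × Int)))
    (g : PySem.Dict (List Int) (PySem.Set (Int × Int))) (p : Int × (Int × Int)) :
    PySem.Dict (List Int) (PySem.Set (Int × Int)) :=
  if 2 ≤ (sigOf items p.2).length ∧ (sigOf items p.2).headD 0 = p.1 then
    g.modify (sigOf items p.2) PySem.Set.empty (fun st => st.add p.2)
  else g

def occOf (l : List (Int × List (Int × Int))) : List (Int × (Int × Int)) :=
  l.flatMap (fun av => av.2.map (fun o => (av.1, o)))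

def condB (items : List (Int × List (Int × Int))) (p : Int × (Int × Int)) : Bool :=
  decide (2 ≤ (sigOf items p.2).length ∧ (sigOf items p.2).headD 0 = p.1)

def goodOf (l : List (Int × List (Int × Int))) : List (Int × (Int × Int)) :=
  (occOf l).filter (condB l)

def keysB (l : List (Int × List (Int × Int))) : List (List Int) :=
  PySem.List.dedup ((goodOf l).map (fun p => sigOf l p.2))

def valB (l : List (Int × List (Int × Int))) (s : List Int) : List (Int × Int) :=
  PySem.Set.ofList (((goodOf l).filter (fun p => sigOf l p.2 == s)).map Prod.snd)

theorem groups_foldl_eq (items : List (Int × List (Int × Int))) :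
    ∀ (l : List (Int × List (Int × Int))) (g : PySem.Dict (List Int) (PySem.Set (Int × Int))),
    l.foldl (fun g av => av.2.foldl (fun g o =>
        if 2 ≤ (sigOf items o).length ∧ (sigOf items o).headD 0 = av.1 then
          g.modify (sigOf items o) PySem.Set.empty (fun st => st.add o)
        else g) g) g
      = (occOf l).foldl (stepB items) g := by
  intro l
  induction l with
  | nil => intro g; rfl
  | cons av l ih =>
    intro g
    rw [List.foldl_cons, ih,
      show occOf (av :: l) = av.2.map (fun o => (av.1, o)) ++ occOf l from rfl,
      List.foldl_append, List.foldl_map]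
    rfl

theorem group_items (items : List (Int × List (Int × Int))) :
    ∀ (xs : List (Int × (Int × Int))),
    ((xs.foldl (stepB items) PySem.Dict.empty)).items
      = (PySem.List.dedup ((xs.filter (condB items)).map (fun p => sigOf items p.2))).map
          (fun s => (s, PySem.Set.ofList
            (((xs.filter (condB items)).filter (fun p => sigOf items p.2 == s)).map Prod.snd))) := by
  intro xs
  induction xs using List.reverseRecOn with
  | nil => rfl
  | append_singleton ys p ih =>
    rw [List.foldl_append, List.foldl_cons, List.foldl_nil, List.filter_append]
    by_cases hp : 2 ≤ (sigOf items p.2).length ∧ (sigOf items p.2).headD 0 = p.1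
    · have hcpt : condB items p = true := decide_eq_true hp
      have hcp : List.filter (condB items) [p] = [p] := by simp [hcpt]
      rw [hcp]
      set K := PySem.List.dedup ((ys.filter (condB items)).map (fun p => sigOf items p.2)) with hK
      set V : List Int → PySem.Set (Int × Int) := fun s => PySem.Set.ofList
          (((ys.filter (condB items)).filter (fun p => sigOf items p.2 == s)).map Prod.snd) with hV
      have hKnd : K.Nodup := PySem.List.nodup_dedup _
      have hD : (ys.foldl (stepB items) PySem.Dict.empty)
          = PySem.Dict.mk (K.map (fun k => (k, V k))) := by
        cases hd : ys.foldl (stepB items) PySem.Dict.empty with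
        | mk its => rw [hd] at ih; simp only [PySem.Dict.items] at ih; rw [ih]
      rw [hD, stepB, if_pos hp, PySem.Dict.modify, PySem.Dict.getD,
        get?_mapkeys V K hKnd (sigOf items p.2)]
      have hmap_p : ([p].map (fun p => sigOf items p.2)) = [sigOf items p.2] := rfl
      have hfp_self : List.filter (fun q => sigOf items q.2 == sigOf items p.2) [p] = [p] := by
        simp
      by_cases hmem : sigOf items p.2 ∈ K
      · rw [if_pos hmem, PySem.Dict.insert,
          contains_mapkeys V K hKnd (sigOf items p.2), decide_eq_true hmem]
        simp only [if_pos rfl, PySem.Dict.items]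
        have hKeq : PySem.List.dedup (((ys.filter (condB items)).map (fun p => sigOf items p.2))
            ++ [p].map (fun p => sigOf items p.2)) = K := by
          rw [hmap_p]
          exact dedup_append_one_mem _ _ (by rwa [hK, PySem.List.mem_dedup] at hmem)
        rw [List.map_append, hKeq, List.map_map]
        apply List.map_congr_left
        intro k hk
        by_cases hks : k = sigOf items p.2
        · subst hks
          simp only [Function.comp, beq_self_eq_true, if_pos rfl]
          refine congrArg (fun v => (sigOf items p.2, v)) ?_
          rw [List.filter_append, List.map_append, hfp_self,
            show ([p].map Prod.snd) = [p.2] from rfl, ofList_append_one, hV]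
          simp
        · simp only [Function.comp]
          rw [if_neg (by simpa using hks)]
          refine congrArg (fun v => (k, v)) ?_
          rw [List.filter_append, List.map_append,
            show List.filter (fun q => sigOf items q.2 == k) [p] = [] from by
              simp [Ne.symm hks]]
          simp [hV]
      · rw [if_neg hmem, PySem.Dict.insert,
          contains_mapkeys V K hKnd (sigOf items p.2), decide_eq_false hmem]
        simp only [Bool.false_eq_true, if_false, PySem.Dict.items]
        have hKeq : PySem.List.dedup (((ys.filter (condB items)).map (fun p => sigOf items p.2))
            ++ [p].map (fun p => sigOf items p.2)) = K ++ [sigOf items p.2] := by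
          rw [hmap_p]
          exact dedup_append_one_notmem _ _ (by
            intro hc
            exact hmem (by rw [hK, PySem.List.mem_dedup]; exact hc))
        rw [List.map_append, hKeq, List.map_append]
        congr 1
        · apply List.map_congr_left
          intro k hk
          refine congrArg (fun v => (k, v)) ?_
          have hks : ¬(sigOf items p.2 = k) := by
            intro hc; exact hmem (hc ▸ hk)
          rw [List.filter_append, List.map_append,
            show List.filter (fun q => sigOf items q.2 == k) [p] = [] from by
              simp [hks]]
          simp [hV]
        · simp only [List.map_cons, List.map_nil]
          refine congrArg (fun v => [(sigOf items p.2, v)]) ?_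
          have hold : (ys.filter (condB items)).filter
              (fun q => sigOf items q.2 == sigOf items p.2) = [] := by
            rw [List.filter_eq_nil_iff]
            intro q hq
            simp only [beq_iff_eq]
            intro hc
            apply hmem
            rw [hK, PySem.List.mem_dedup]
            exact List.mem_map.2 ⟨q, hq, hc⟩
          rw [List.filter_append, List.map_append, hold, hfp_self]
          simp [PySem.Set.add, PySem.Set.empty, PySem.Set.ofList]
    · have hcpt : condB items p = false := decide_eq_false hp
      have hcp : List.filter (condB items) [p] = [] := by simp [hcpt]
      rw [hcp, List.append_nil, show stepB items (ys.foldl (stepB items) PySem.Dict.empty) p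
        = ys.foldl (stepB items) PySem.Dict.empty from by rw [stepB, if_neg hp], ih]

theorem sorted2_eq_sorted (xs : List (List Int)) (k1 : List Int → Int)
    (k2 : List Int → List Int) :
    PySem.List.sorted2 xs k1 k2 = PySem.List.sorted xs (fun a => toLex (k1 a, k2 a)) := by
  simp only [PySem.List.sorted2, PySem.List.sorted]
  have hbe : (fun (a b : List Int) => decide (k1 a < k1 b) || (!decide (k1 b < k1 a) && decide (k2 a < k2 b)))
      = (fun a b => decide (toLex (k1 a, k2 a) < toLex (k1 b, k2 b))) := by
    funext a b
    by_cases h1 : k1 a < k1 b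
    · simp [h1, Prod.Lex.toLex_lt_toLex]
    · by_cases h2 : k1 b < k1 a
      · simp [h1, h2, Prod.Lex.toLex_lt_toLex, ne_of_gt h2]
      · have he : k1 a = k1 b := le_antisymm (not_lt.1 h2) (not_lt.1 h1)
        simp [h1, h2, he, Prod.Lex.toLex_lt_toLex]
  simp only [if_neg (by simp : ¬(false = true))]
  rw [hbe]

-- ---------- §6 matching the two characterizations ----------

def keptOf (l : List (Int × List (Int × Int))) : List (List (Int × List (Int × Int))) :=
  (set_Z_groupes l l.length).filter (fun G => !(valOf l G).isEmpty)

def keysA (l : List (Int × List (Int × Int))) : List (List Int) :=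
  (keptOf l).map (List.map Prod.fst)

theorem mem_occ (l : List (Int × List (Int × Int))) (p : Int × (Int × Int)) :
    p ∈ occOf l ↔ ∃ av ∈ l, av.1 = p.1 ∧ p.2 ∈ av.2 := by
  simp only [occOf, List.mem_flatMap, List.mem_map]
  constructor
  · rintro ⟨av, hav, o, ho, rfl⟩; exact ⟨av, hav, rfl, ho⟩
  · rintro ⟨av, hav, h1, h2⟩
    exact ⟨av, hav, p.2, h2, by rw [h1]⟩

theorem mem_val_self (l : List (Int × List (Int × Int))) (o : Int × Int)
    (h2 : 2 ≤ (grpOf l o).length) : o ∈ valOf l (grpOf l o) := by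
  have hgne : grpOf l o ≠ [] := by
    intro h; rw [h] at h2; simp at h2
  match hg : grpOf l o, hgne with
  | kv₀ :: gt, _ =>
    have hkv₀ : kv₀ ∈ grpOf l o := by rw [hg]; exact List.mem_cons_self
    have hcont : kv₀.2.contains o := ((mem_grp l o kv₀).1 hkv₀).2
    simp only [valOf, List.mem_filter, List.headD_cons]
    refine ⟨(PySem.List.mem_dedup _ _).2 (by simpa using hcont), ?_⟩
    simp only [beq_iff_eq]
    rw [← hg, ← sig_eq_map_grp]
  | [], h => exact absurd rfl h

theorem sig_length_eq (l : List (Int × List (Int × Int))) (o : Int × Int) :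
    (sigOf l o).length = (grpOf l o).length := by
  rw [sig_eq_map_grp]; simp

theorem keysB_mem_of_kept {l : List (Int × List (Int × Int))}
    (hnd : (l.map Prod.fst).Nodup) {G : List (Int × List (Int × Int))}
    (hG : G ∈ keptOf l) : G.map Prod.fst ∈ keysB l := by
  obtain ⟨hGg, hGv⟩ := List.mem_filter.1 hG
  obtain ⟨hGsub, hGlen, -⟩ := (groupes_mem l l.length G).1 hGg
  match G, hGlen with
  | g₀ :: Gt, hGlen2 =>
  have hg₀ : g₀ ∈ l := hGsub.mem List.mem_cons_self
  have hvne : valOf l (g₀ :: Gt) ≠ [] := by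
    simpa [List.isEmpty_iff] using hGv
  obtain ⟨o, ho⟩ := List.exists_mem_of_ne_nil _ hvne
  obtain ⟨hod, hos⟩ := List.mem_filter.1 ho
  have hsig : sigOf l o = (g₀ :: Gt).map Prod.fst := by simpa using hos
  have hog : o ∈ g₀.2 := by
    simpa using (PySem.List.mem_dedup _ _).1 (by simpa using hod)
  have hocc : (g₀.1, o) ∈ occOf l := (mem_occ l (g₀.1, o)).2 ⟨g₀, hg₀, rfl, hog⟩
  have hcond : condB l (g₀.1, o) = true := by
    apply decide_eq_true
    constructor
    · rw [show ((g₀.1, o) : Int × (Int × Int)).2 = o from rfl, hsig]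
      simpa using hGlen2
    · rw [show ((g₀.1, o) : Int × (Int × Int)).2 = o from rfl, hsig]
      rfl
  rw [keysB, PySem.List.mem_dedup]
  exact List.mem_map.2 ⟨(g₀.1, o), List.mem_filter.2 ⟨hocc, hcond⟩, hsig⟩

theorem kept_of_keysB {l : List (Int × List (Int × Int))}
    (hnd : (l.map Prod.fst).Nodup) {s : List Int} (hs : s ∈ keysB l) :
    ∃ G ∈ keptOf l, G.map Prod.fst = s := by
  rw [keysB, PySem.List.mem_dedup] at hs
  obtain ⟨p, hp, hsig⟩ := List.mem_map.1 hs
  obtain ⟨hocc, hcond⟩ := List.mem_filter.1 hp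
  have hcond' := of_decide_eq_true hcond
  have hlen2 : 2 ≤ (grpOf l p.2).length := by
    rw [← sig_length_eq]; exact hcond'.1
  refine ⟨grpOf l p.2, List.mem_filter.2 ⟨?_, ?_⟩, by rw [← sig_eq_map_grp, hsig]⟩
  · exact (groupes_mem l l.length (grpOf l p.2)).2
      ⟨grp_sublist l p.2, hlen2, (grp_sublist l p.2).length_le⟩
  · have hmm := mem_val_self l p.2 hlen2
    have hne : valOf l (grpOf l p.2) ≠ [] := fun h => absurd (h ▸ hmm) (List.not_mem_nil)
    simp [List.isEmpty_iff, hne]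

theorem flatMap_single {α β : Type} (F : α → List β) :
    ∀ (l : List α), l.Nodup → ∀ g₀ ∈ l, (∀ av ∈ l, av ≠ g₀ → F av = []) →
    l.flatMap F = F g₀ := by
  intro l
  induction l with
  | nil => intro _ g₀ h; simp at h
  | cons av l ih =>
    intro hnd g₀ hg₀ hF
    rw [List.flatMap_cons]
    rcases List.mem_cons.1 hg₀ with rfl | hmem
    · have : l.flatMap F = [] := by
        rw [List.flatMap_eq_nil_iff]
        intro av' hav'
        refine hF av' (List.mem_cons_of_mem _ hav') ?_
        intro hc
        exact (List.nodup_cons.1 hnd).1 (hc ▸ hav')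
      rw [this, List.append_nil]
    · have hne : av ≠ g₀ := by
        intro hc
        exact (List.nodup_cons.1 hnd).1 (hc ▸ hmem)
      rw [hF av List.mem_cons_self hne, List.nil_append]
      exact ih (List.nodup_cons.1 hnd).2 g₀ hmem
        (fun av' h' hne' => hF av' (List.mem_cons_of_mem _ h') hne')

theorem valB_eq {l : List (Int × List (Int × Int))}
    (hnd : (l.map Prod.fst).Nodup) {G : List (Int × List (Int × Int))}
    (hG : G ∈ keptOf l) : valB l (G.map Prod.fst) = valOf l G := by
  obtain ⟨hGg, -⟩ := List.mem_filter.1 hG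
  obtain ⟨hGsub, hGlen, -⟩ := (groupes_mem l l.length G).1 hGg
  match G, hGlen with
  | g₀ :: Gt, hGlen2 =>
  have hg₀ : g₀ ∈ l := hGsub.mem List.mem_cons_self
  have hndl : l.Nodup := List.Nodup.of_map Prod.fst hnd
  set s := (g₀ :: Gt).map Prod.fst with hss
  have hhead : s.headD 0 = g₀.1 := rfl
  have hslen : s.length = Gt.length + 1 := by simp [hss]
  -- merge the two filters over the occurrence list
  have h1 : (goodOf l).filter (fun p => sigOf l p.2 == s)
      = (occOf l).filter (fun p => (sigOf l p.2 == s) && condB l p) := by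
    rw [goodOf, List.filter_filter]
  -- only g₀'s objects survive
  have h2 : (occOf l).filter (fun p => (sigOf l p.2 == s) && condB l p)
      = (g₀.2.filter (fun o => (sigOf l o == s) && condB l (g₀.1, o))).map
          (fun o => (g₀.1, o)) := by
    have hfm : ∀ (L : List (Int × List (Int × Int))),
        (L.flatMap (fun av => av.2.map (fun o => (av.1, o)))).filter
            (fun p => (sigOf l p.2 == s) && condB l p)
          = L.flatMap (fun av =>
              (av.2.filter (fun o => (sigOf l o == s) && condB l (av.1, o))).map
                (fun o => (av.1, o))) := by
      intro L
      induction L with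
      | nil => rfl
      | cons av L ihL =>
        rw [List.flatMap_cons, List.flatMap_cons, List.filter_append, ihL, List.filter_map]
        rfl
    rw [occOf, hfm l]
    rw [flatMap_single _ l hndl g₀ hg₀ ?_]
    intro av hav hne
    rw [List.map_eq_nil_iff, List.filter_eq_nil_iff]
    intro o _
    by_cases hsi : sigOf l o = s
    · have hc : condB l (av.1, o) = false := by
        apply decide_eq_false
        rintro ⟨-, hh⟩
        rw [show ((av.1, o) : Int × (Int × Int)).2 = o from rfl,
          show ((av.1, o) : Int × (Int × Int)).1 = av.1 from rfl, hsi, hhead] at hh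
        exact hne (List.inj_on_of_nodup_map hnd hav hg₀ hh.symm)
      simp [hc]
    · simp [hsi]
  -- inside g₀'s list the extra condition is implied
  have h3 : g₀.2.filter (fun o => (sigOf l o == s) && condB l (g₀.1, o))
      = g₀.2.filter (fun o => sigOf l o == s) := by
    apply List.filter_congr
    intro o _
    cases hsi : (sigOf l o == s) with
    | false => rfl
    | true =>
      have hsi' : sigOf l o = s := beq_iff_eq.1 hsi
      have : condB l (g₀.1, o) = true := by
        apply decide_eq_true
        refine ⟨?_, ?_⟩
        · rw [show ((g₀.1, o) : Int × (Int × Int)).2 = o from rfl, hsi', hslen]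
          have : 1 ≤ Gt.length := by simpa using hGlen2
          omega
        · rw [show ((g₀.1, o) : Int × (Int × Int)).2 = o from rfl, hsi', hhead]
      rw [this]
      rfl
  rw [valB, h1, h2, h3, List.map_map]
  rw [show (Prod.snd ∘ fun o => ((g₀.1, o) : Int × (Int × Int))) = id from rfl, List.map_id]
  rw [← PySem.List.dedup_eq_ofList, dedup_filter]
  rfl

theorem enum_fst (l : List (Int × List (Int × Int))) :
    ∀ (st : Int), ((PySem.List.enumerate l st).map (fun p => (p.2.1, p.1))).map Prod.fst
      = l.map Prod.fst := by
  induction l with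
  | nil => intro st; rfl
  | cons av l ih =>
    intro st
    rw [show PySem.List.enumerate (av :: l) st = (st, av) :: PySem.List.enumerate l (st + 1)
      from rfl]
    simp only [List.map_cons]
    rw [ih (st + 1)]

theorem pos_getD {l : List (Int × List (Int × Int))}
    (hnd : (l.map Prod.fst).Nodup) {k : Int} (hk : k ∈ l.map Prod.fst) :
    (PySem.Dict.ofList ((PySem.List.enumerate l).map (fun p => (p.2.1, p.1)))).getD k 0
      = (List.idxOf k (l.map Prod.fst) : Int) := by
  have hitems := ofList_items_nodup ((PySem.List.enumerate l 0).map (fun p => (p.2.1, p.1)))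
    (by rw [enum_fst l 0]; exact hnd)
  rw [show PySem.List.enumerate l = PySem.List.enumerate l 0 from rfl]
  rw [PySem.Dict.getD, PySem.Dict.get?, hitems, enum_find k l 0 hk]
  simp

theorem keptOf_pairwise (l : List (Int × List (Int × Int)))
    (hnd : (l.map Prod.fst).Nodup) :
    (keysA l).Pairwise (fun s t => posKey l s < posKey l t) := by
  rw [keysA, List.pairwise_map]
  exact (groupes_pairwise l hnd l.length).filter _

theorem keysA_nodup (l : List (Int × List (Int × Int)))
    (hnd : (l.map Prod.fst).Nodup) : (keysA l).Nodup := by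
  refine (keptOf_pairwise l hnd).imp ?_
  intro s t h hst
  rw [hst] at h
  exact lt_irrefl _ h

-- ---------- §7 assembling B ----------

theorem setZalt_eq (l : List (Int × List (Int × Int)))
    (hnd : (l.map Prod.fst).Nodup) :
    set_Z_alt l = expectItems l (set_Z_groupes l l.length) := by
  have hKnd : (keysB l).Nodup := PySem.List.nodup_dedup _
  have hD : (occOf l).foldl (stepB l) PySem.Dict.empty
      = PySem.Dict.mk ((keysB l).map (fun s => (s, valB l s))) := by
    apply PySem.Dict.ext
    rw [group_items l (occOf l)]
    rfl
  have hkeys : (PySem.Dict.mk ((keysB l).map (fun s => (s, valB l s)))).keys = keysB l := by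
    simp only [PySem.Dict.keys, PySem.Dict.items, List.map_map]
    conv_rhs => rw [show keysB l = (keysB l).map id from (List.map_id _).symm]
    exact List.map_congr_left (fun s _ => rfl)
  have hkeysAmem : ∀ s ∈ keysA l, ∀ k ∈ s, k ∈ l.map Prod.fst := by
    intro s hs k hk
    rw [keysA] at hs
    obtain ⟨G, hG, rfl⟩ := List.mem_map.1 hs
    obtain ⟨hGg, -⟩ := List.mem_filter.1 hG
    exact (((groupes_mem l l.length G).1 hGg).1.map Prod.fst).mem hk
  have hkeyB_eq : ∀ s ∈ keysA l,
      toLex (-(s.length : Int), s.map (fun k =>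
        (PySem.Dict.ofList ((PySem.List.enumerate l).map (fun p => (p.2.1, p.1)))).getD k 0))
      = posKey l s := by
    intro s hs
    rw [posKey]
    refine congrArg toLex ?_
    refine congrArg (fun m => ((-(s.length : Int), m) : Int × List Int)) ?_
    apply List.map_congr_left
    intro k hk
    exact pos_getD hnd (hkeysAmem s hs k hk)
  have hperm : (keysA l).Perm (keysB l) := by
    rw [List.perm_ext_iff_of_nodup (keysA_nodup l hnd) hKnd]
    intro s
    constructor
    · intro hs
      obtain ⟨G, hG, rfl⟩ := List.mem_map.1 hs
      exact keysB_mem_of_kept hnd hG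
    · intro hs
      obtain ⟨G, hG, rfl⟩ := kept_of_keysB hnd hs
      exact List.mem_map.2 ⟨G, hG, rfl⟩
  have hpw : (keysA l).Pairwise (fun a b =>
      toLex (-(a.length : Int), a.map (fun k =>
        (PySem.Dict.ofList ((PySem.List.enumerate l).map (fun p => (p.2.1, p.1)))).getD k 0))
      < toLex (-(b.length : Int), b.map (fun k =>
        (PySem.Dict.ofList ((PySem.List.enumerate l).map (fun p => (p.2.1, p.1)))).getD k 0))) := by
    refine List.Pairwise.imp_of_mem ?_ (keptOf_pairwise l hnd)
    intro a b ha hb h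
    rw [hkeyB_eq a ha, hkeyB_eq b hb]
    exact h
  have hsorted : PySem.List.sorted (keysB l) (fun s => toLex (-(s.length : Int),
      s.map (fun k =>
        (PySem.Dict.ofList ((PySem.List.enumerate l).map (fun p => (p.2.1, p.1)))).getD k 0)))
      = keysA l :=
    PySem.List.sorted_eq_of_perm_of_pairwise_lt _ _ _ hperm hpw
  have hins : ((keysA l).foldl (fun d s => d.insert s
        ((PySem.Dict.mk ((keysB l).map (fun s => (s, valB l s)))).getD s []))
        PySem.Dict.empty).items
      = (keysA l).map (fun s => (s,
        (PySem.Dict.mk ((keysB l).map (fun s => (s, valB l s)))).getD s [])) :=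
    insert_fold_nodup _ (keysA l) (keysA_nodup l hnd)
  simp only [set_Z_alt]
  rw [groups_foldl_eq l l PySem.Dict.empty, hD, hkeys, sorted2_eq_sorted]
  rw [hsorted, hins]
  rw [show expectItems l (set_Z_groupes l l.length)
      = (keptOf l).map (fun G => (G.map Prod.fst, valOf l G)) from rfl]
  rw [keysA, List.map_map]
  apply List.map_congr_left
  intro G hG
  simp only [Function.comp]
  refine congrArg (fun v => (G.map Prod.fst, v)) ?_
  rw [PySem.Dict.getD, get?_mapkeys (valB l) (keysB l) hKnd (G.map Prod.fst),
    if_pos (keysB_mem_of_kept hnd hG)]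
  rw [Option.getD_some]
  exact valB_eq hnd hG

-- ===== VERDICT (by name: the statement is the Claim_ definition above) =====
theorem set_Z_spec : Claim_equal_set_Z := by
  intro l _ hpre
  show set_Z l = set_Z_alt l
  rw [setZ_eq_expect l hpre, setZalt_eq l hpre]
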